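-- pv_equiv track=rewrite | github.com/AndreyStartsev/DTL2025 | src/query_analyzer.py | _group_by_semantic_type
-- ===== SOURCE A (Python) =====
-- from typing import List, Dict, Set, Tuple
--
-- def _group_by_semantic_type(columns: Dict[str, int],
--                             schema_columns: List[Dict]) -> Dict[str, List[str]]:
--     """
--     Groups columns by semantic meaning using pattern matching.
--     Detects: dates, locations, identifiers, categories, etc.
--     """
--     semantic_groups = {
--         'temporal': [],
--         'geographic': [],
--         'identifier': [],
--         'categorical': [],
--         'numeric': []
--     }
--
--     # Build column type lookup
--     col_types = {col['name']: col.get('type', '').lower()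
--                  for col in schema_columns if 'name' in col}
--
--     for col in columns.keys():
--         col_lower = col.lower()
--         col_type = col_types.get(col, '').lower()
--
--         # Temporal patterns
--         if any(pattern in col_lower for pattern in
--                ['date', 'time', 'year', 'month', 'day', 'quarter', 'timestamp', 'created', 'updated']):
--             semantic_groups['temporal'].append(col)
--
--         # Geographic patterns
--         elif any(pattern in col_lower for pattern in
--                  ['city', 'state', 'country', 'region', 'location', 'address', 'zip', 'postal']):
--             semantic_groups['geographic'].append(col)
--
--         # Identifier patterns (IDs, codes, keys)
--         elif any(pattern in col_lower for pattern in
--                  ['id', 'key', 'code', 'number']) or col_lower.endswith('_id'):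
--             semantic_groups['identifier'].append(col)
--
--         # Categorical (low cardinality text fields)
--         elif 'varchar' in col_type or 'char' in col_type or 'string' in col_type:
--             semantic_groups['categorical'].append(col)
--
--         # Numeric (but not IDs)
--         elif any(t in col_type for t in ['int', 'decimal', 'float', 'double', 'numeric']) \
--                 and 'id' not in col_lower:
--             semantic_groups['numeric'].append(col)
--
--     # Only return groups with 2+ columns
--     return {group_type: cols for group_type, cols in semantic_groups.items()
--             if len(cols) >= 2}
-- ===== SOURCE B (Python) =====
-- _RULES = [
--     ('temporal', lambda cl, ct: any(p in cl for p in
--         ['date', 'time', 'year', 'month', 'day', 'quarter', 'timestamp', 'created', 'updated'])),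
--     ('geographic', lambda cl, ct: any(p in cl for p in
--         ['city', 'state', 'country', 'region', 'location', 'address', 'zip', 'postal'])),
--     ('identifier', lambda cl, ct: any(p in cl for p in
--         ['id', 'key', 'code', 'number']) or cl.endswith('_id')),
--     ('categorical', lambda cl, ct: 'varchar' in ct or 'char' in ct or 'string' in ct),
--     ('numeric', lambda cl, ct: any(t in ct for t in
--         ['int', 'decimal', 'float', 'double', 'numeric']) and 'id' not in cl),
-- ]
--
--
-- def _classify(col_types, col):
--     cl = col.lower()
--     ct = col_types.get(col, '').lower()
--     for name, pred in _RULES: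
--         if pred(cl, ct):
--             return name
--     return None
--
--
-- def _group_by_semantic_type(columns, schema_columns):
--     col_types = {col['name']: col.get('type', '').lower()
--                  for col in schema_columns if 'name' in col}
--     result = {}
--     for cat, _ in _RULES:
--         cols = [col for col in columns if _classify(col_types, col) == cat]
--         if len(cols) >= 2:
--             result[cat] = cols
--     return result
-- ===== Notes on version B (the rewrite author's own statement) =====
-- stated objective: idiomatic
-- what changed: Replaces the five-way if/elif chain that appends into a pre-built dict column-by-column with an ordered rules table plus a classify helper, building the result category-by-category (one filtering pass per category) instead of column-by-column.
import Mathlib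
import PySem

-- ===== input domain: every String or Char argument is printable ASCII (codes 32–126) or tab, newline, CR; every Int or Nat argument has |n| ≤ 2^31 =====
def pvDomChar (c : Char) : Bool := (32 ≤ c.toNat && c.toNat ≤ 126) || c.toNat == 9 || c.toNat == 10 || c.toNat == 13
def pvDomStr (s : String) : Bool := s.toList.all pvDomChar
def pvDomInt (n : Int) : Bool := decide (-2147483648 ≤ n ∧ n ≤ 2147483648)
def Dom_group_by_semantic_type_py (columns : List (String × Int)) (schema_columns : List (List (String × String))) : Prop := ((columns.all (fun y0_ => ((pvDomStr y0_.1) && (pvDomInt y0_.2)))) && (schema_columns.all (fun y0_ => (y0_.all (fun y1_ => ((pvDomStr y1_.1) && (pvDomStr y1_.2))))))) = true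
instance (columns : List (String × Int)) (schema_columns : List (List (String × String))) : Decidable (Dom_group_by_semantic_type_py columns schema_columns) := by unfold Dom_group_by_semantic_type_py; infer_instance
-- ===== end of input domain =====

-- B groups category-by-category with an ordered rules table instead of A's per-column if/elif
-- chain appending into a pre-built dict; same results, different decomposition (objective: idiomatic).

-- shared literal pattern lists (the same string literals appear in both Pythons)
def pvTemporalPats : List String := ["date", "time", "year", "month", "day", "quarter", "timestamp", "created", "updated"]
def pvGeoPats : List String := ["city", "state", "country", "region", "location", "address", "zip", "postal"]
def pvIdentPats : List String := ["id", "key", "code", "number"]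
def pvNumPats : List String := ["int", "decimal", "float", "double", "numeric"]

-- ===== PORT A =====
-- col_types = {col['name']: col.get('type','').lower() for col in schema_columns if 'name' in col}
def pvColTypesA (schema_columns : List (List (String × String))) : PySem.Dict String String :=
  schema_columns.foldl (fun d col =>
    if PySem.Dict.contains (PySem.Dict.mk col) "name" then
      PySem.Dict.insert d (PySem.Dict.getD (PySem.Dict.mk col) "name" "")
        (PySem.Str.lower (PySem.Dict.getD (PySem.Dict.mk col) "type" ""))
    else d) PySem.Dict.empty

-- the body of A's for-loop: the if/elif chain appending col into semantic_groups
def pvAStep (colTypes : PySem.Dict String String) (g : PySem.Dict String (List String))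
    (col : String) : PySem.Dict String (List String) :=
  let cl := PySem.Str.lower col
  let ct := PySem.Str.lower (PySem.Dict.getD colTypes col "")
  if pvTemporalPats.any (fun p => PySem.Str.isIn p cl) then
    PySem.Dict.modify g "temporal" [] (fun l => l ++ [col])
  else if pvGeoPats.any (fun p => PySem.Str.isIn p cl) then
    PySem.Dict.modify g "geographic" [] (fun l => l ++ [col])
  else if pvIdentPats.any (fun p => PySem.Str.isIn p cl) || PySem.Str.endswith cl "_id" then
    PySem.Dict.modify g "identifier" [] (fun l => l ++ [col])
  else if PySem.Str.isIn "varchar" ct || PySem.Str.isIn "char" ct || PySem.Str.isIn "string" ct then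
    PySem.Dict.modify g "categorical" [] (fun l => l ++ [col])
  else if pvNumPats.any (fun t => PySem.Str.isIn t ct) && !PySem.Str.isIn "id" cl then
    PySem.Dict.modify g "numeric" [] (fun l => l ++ [col])
  else g

def group_by_semantic_type_py (columns : List (String × Int)) (schema_columns : List (List (String × String))) : List (String × List String) :=
  let semantic_groups : PySem.Dict String (List String) :=
    PySem.Dict.mk [("temporal", []), ("geographic", []), ("identifier", []), ("categorical", []), ("numeric", [])]
  let col_types := pvColTypesA schema_columns
  let final := columns.foldl (fun g kv => pvAStep col_types g kv.1) semantic_groups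
  final.items.filter (fun p => 2 ≤ p.2.length)

-- ===== PORT B =====
def pvColTypesB (schema_columns : List (List (String × String))) : PySem.Dict String String :=
  schema_columns.foldl (fun d col =>
    if PySem.Dict.contains (PySem.Dict.mk col) "name" then
      PySem.Dict.insert d (PySem.Dict.getD (PySem.Dict.mk col) "name" "")
        (PySem.Str.lower (PySem.Dict.getD (PySem.Dict.mk col) "type" ""))
    else d) PySem.Dict.empty

-- _RULES: ordered (category, predicate) table
def pvRules : List (String × (String → String → Bool)) :=
  [("temporal", fun cl _ => pvTemporalPats.any (fun p => PySem.Str.isIn p cl)),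
   ("geographic", fun cl _ => pvGeoPats.any (fun p => PySem.Str.isIn p cl)),
   ("identifier", fun cl _ => pvIdentPats.any (fun p => PySem.Str.isIn p cl) || PySem.Str.endswith cl "_id"),
   ("categorical", fun _ ct => PySem.Str.isIn "varchar" ct || PySem.Str.isIn "char" ct || PySem.Str.isIn "string" ct),
   ("numeric", fun cl ct => pvNumPats.any (fun t => PySem.Str.isIn t ct) && !PySem.Str.isIn "id" cl)]

-- _classify: first rule whose predicate fires
def pvClassify (colTypes : PySem.Dict String String) (col : String) : Option String :=
  let cl := PySem.Str.lower col
  let ct := PySem.Str.lower (PySem.Dict.getD colTypes col "")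
  (pvRules.find? (fun r => r.2 cl ct)).map Prod.fst

def group_by_semantic_type_py_alt (columns : List (String × Int)) (schema_columns : List (List (String × String))) : List (String × List String) :=
  let col_types := pvColTypesB schema_columns
  (pvRules.map Prod.fst).filterMap (fun cat =>
    let cols := (columns.map Prod.fst).filter (fun col => pvClassify col_types col == some cat)
    if 2 ≤ cols.length then some (cat, cols) else none)

-- ===== PRECONDITION & SPEC =====
def Spec_group_by_semantic_type_py (columns : List (String × Int)) (schema_columns : List (List (String × String))) (out : List (String × List String)) : Prop := out = group_by_semantic_type_py_alt columns schema_columns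
instance (columns : List (String × Int)) (schema_columns : List (List (String × String))) (out : List (String × List String)) : Decidable (Spec_group_by_semantic_type_py columns schema_columns out) := by unfold Spec_group_by_semantic_type_py; infer_instance

-- ===== CLAIM (what is proved, stated in full; the proofs are below) =====
def Claim_equal_group_by_semantic_type_py : Prop := ∀ (columns : List (String × Int)) (schema_columns : List (List (String × String))), Dom_group_by_semantic_type_py columns schema_columns → Spec_group_by_semantic_type_py columns schema_columns (group_by_semantic_type_py columns schema_columns)

-- ===== LEMMAS AND PROOFS =====
-- the two Pythons build col_types by the same comprehension
lemma pvColTypes_eq : pvColTypesB = pvColTypesA := rfl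

-- one step of A's loop sorts col into exactly the category B's classify assigns it
lemma pvStep_classify (ct : PySem.Dict String String) (k : String) (t g i c n : List String) :
    pvAStep ct (PySem.Dict.mk [("temporal", t), ("geographic", g), ("identifier", i), ("categorical", c), ("numeric", n)]) k
    = PySem.Dict.mk
      [("temporal", t ++ if pvClassify ct k == some "temporal" then [k] else []),
       ("geographic", g ++ if pvClassify ct k == some "geographic" then [k] else []),
       ("identifier", i ++ if pvClassify ct k == some "identifier" then [k] else []),
       ("categorical", c ++ if pvClassify ct k == some "categorical" then [k] else []),
       ("numeric", n ++ if pvClassify ct k == some "numeric" then [k] else [])] := by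
  cases h1 : pvTemporalPats.any (fun p => PySem.Str.isIn p (PySem.Str.lower k)) <;>
  cases h2 : pvGeoPats.any (fun p => PySem.Str.isIn p (PySem.Str.lower k)) <;>
  cases h3 : (pvIdentPats.any (fun p => PySem.Str.isIn p (PySem.Str.lower k)) || PySem.Str.endswith (PySem.Str.lower k) "_id") <;>
  cases h4 : (PySem.Str.isIn "varchar" (PySem.Str.lower (PySem.Dict.getD ct k "")) || PySem.Str.isIn "char" (PySem.Str.lower (PySem.Dict.getD ct k "")) || PySem.Str.isIn "string" (PySem.Str.lower (PySem.Dict.getD ct k ""))) <;>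
  cases h5 : (pvNumPats.any (fun t => PySem.Str.isIn t (PySem.Str.lower (PySem.Dict.getD ct k ""))) && !PySem.Str.isIn "id" (PySem.Str.lower k)) <;>
  simp only [pvAStep, pvClassify, pvRules, List.find?, h1, h2, h3, h4, h5] <;>
  simp [PySem.Dict.modify, PySem.Dict.insert, PySem.Dict.getD, PySem.Dict.get?, PySem.Dict.contains]

-- A's whole loop = each of the five groups extended by B's per-category filter
lemma pvFoldl_groups (ct : PySem.Dict String String) (ks : List String)
    (t g i c n : List String) :
    ks.foldl (fun d col => pvAStep ct d col)
      (PySem.Dict.mk [("temporal", t), ("geographic", g), ("identifier", i), ("categorical", c), ("numeric", n)])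
    = PySem.Dict.mk
      [("temporal", t ++ ks.filter (fun k => pvClassify ct k == some "temporal")),
       ("geographic", g ++ ks.filter (fun k => pvClassify ct k == some "geographic")),
       ("identifier", i ++ ks.filter (fun k => pvClassify ct k == some "identifier")),
       ("categorical", c ++ ks.filter (fun k => pvClassify ct k == some "categorical")),
       ("numeric", n ++ ks.filter (fun k => pvClassify ct k == some "numeric"))] := by
  induction ks generalizing t g i c n with
  | nil => simp
  | cons k ks ih =>
    rw [List.foldl_cons, pvStep_classify, ih]
    simp only [List.filter_cons]
    split_ifs <;> simp

-- A's final ≥2 filter over the five fixed groups = B's filterMap over the category names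
lemma pvFinal (F : String → List String) :
    List.filter (fun p => decide (2 ≤ p.2.length))
      [("temporal", F "temporal"), ("geographic", F "geographic"), ("identifier", F "identifier"), ("categorical", F "categorical"), ("numeric", F "numeric")]
    = List.filterMap (fun cat => if 2 ≤ (F cat).length then some (cat, F cat) else none)
        ["temporal", "geographic", "identifier", "categorical", "numeric"] := by
  by_cases H1 : 2 ≤ (F "temporal").length <;>
  by_cases H2 : 2 ≤ (F "geographic").length <;>
  by_cases H3 : 2 ≤ (F "identifier").length <;>
  by_cases H4 : 2 ≤ (F "categorical").length <;>
  by_cases H5 : 2 ≤ (F "numeric").length <;>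
  simp [H1, H2, H3, H4, H5]

-- ===== VERDICT (by name: the statement is the Claim_ definition above) =====
set_option maxHeartbeats 1000000 in
theorem group_by_semantic_type_py_spec : Claim_equal_group_by_semantic_type_py := by
  intro columns schema_columns _
  unfold Spec_group_by_semantic_type_py
  simp only [group_by_semantic_type_py, group_by_semantic_type_py_alt, pvColTypes_eq]
  have hfm := (List.foldl_map (f := @Prod.fst String Int)
    (g := fun d col => pvAStep (pvColTypesA schema_columns) d col)
    (l := columns)
    (init := PySem.Dict.mk [("temporal", []), ("geographic", []), ("identifier", []), ("categorical", []), ("numeric", [])])).symm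
  rw [hfm, pvFoldl_groups]
  simp only [List.nil_append, pvRules, List.map_cons, List.map_nil]
  exact pvFinal (fun cat => List.filter (fun col => pvClassify (pvColTypesA schema_columns) col == some cat) (columns.map Prod.fst))
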